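-- pv_equiv track=rewrite | github.com/shrijatewari/voting-dbms-project | ai-services/duplicate-engine/utils/string_matching.py | metaphone
-- ===== SOURCE A (Python) =====
-- def metaphone(word: str) -> str:
--     """Metaphone phonetic encoding (simplified version)"""
--     if not word:
--         return ""
--
--     word = word.upper()
--     # Simplified Metaphone - in production, use a library like Metaphone
--     # This is a basic implementation
--     word = word.replace('PH', 'F')
--     word = word.replace('CK', 'K')
--     word = word.replace('C', 'K')
--     word = word.replace('Q', 'K')
--     word = word.replace('Z', 'S')
--     word = word.replace('X', 'KS')
--
--     # Remove vowels except at start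
--     if len(word) > 1:
--         word = word[0] + ''.join(c for c in word[1:] if c not in 'AEIOU')
--
--     return word[:4]  # Return first 4 characters
-- ===== SOURCE B (Python) =====
-- def metaphone(word: str) -> str:
--     """Single pass with two-char lookahead instead of six sequential replace() scans."""
--     w = word.upper()
--     n = len(w)
--     out = []
--     i = 0
--     while i < n:
--         c = w[i]
--         if c == 'P' and i + 1 < n and w[i + 1] == 'H':
--             tok, i = 'F', i + 2
--         elif c == 'C' and i + 1 < n and w[i + 1] == 'K':
--             tok, i = 'K', i + 2
--         elif c == 'C':
--             tok, i = 'K', i + 1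
--         elif c == 'Q':
--             tok, i = 'K', i + 1
--         elif c == 'Z':
--             tok, i = 'S', i + 1
--         elif c == 'X':
--             tok, i = 'KS', i + 1
--         else:
--             tok, i = c, i + 1
--         if out and tok in 'AEIOU':
--             continue
--         out.append(tok)
--     return ''.join(out)[:4]
-- ===== Notes on version B (the rewrite author's own statement) =====
-- stated objective: alternative
-- what changed: A makes six sequential whole-string replace() passes plus a separate vowel-removal pass and then truncates; B does one left-to-right pass with a two-char lookahead, mapping PH/CK digraphs and C/Q/Z/X directly while dropping non-leading vowels inline.
import Mathlib
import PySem

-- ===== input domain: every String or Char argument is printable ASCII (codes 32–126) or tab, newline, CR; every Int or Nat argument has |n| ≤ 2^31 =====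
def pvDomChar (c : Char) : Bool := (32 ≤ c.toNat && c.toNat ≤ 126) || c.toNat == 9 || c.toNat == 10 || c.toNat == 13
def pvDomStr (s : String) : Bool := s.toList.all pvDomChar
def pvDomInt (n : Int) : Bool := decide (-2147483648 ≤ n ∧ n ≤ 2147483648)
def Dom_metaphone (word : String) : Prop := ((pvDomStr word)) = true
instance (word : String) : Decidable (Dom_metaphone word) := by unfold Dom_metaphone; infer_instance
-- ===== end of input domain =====

-- B replaces A's six sequential whole-string replace() scans and the separate vowel pass
-- by one left-to-right pass with a two-char lookahead; same return value on every input.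

-- ===== PORT A =====
def metaphone (word : String) : String :=
  if word = "" then "" else
  let w1 := PySem.Str.upper word
  let w2 := PySem.Str.replace w1 "PH" "F"
  let w3 := PySem.Str.replace w2 "CK" "K"
  let w4 := PySem.Str.replace w3 "C" "K"
  let w5 := PySem.Str.replace w4 "Q" "K"
  let w6 := PySem.Str.replace w5 "Z" "S"
  let w7 := PySem.Str.replace w6 "X" "KS"
  let w8 :=
    if 1 < PySem.Str.len w7 then
      match PySem.Str.pyGet? w7 0 with
      | some c =>
          String.ofList (c :: (PySem.Str.slice w7 (some 1) none).toList.filter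
            (fun ch => !(PySem.Chars.isIn [ch] "AEIOU".toList)))
      | none => ""   -- unreachable: len w7 > 1
    else w7
  PySem.Str.slice w8 none (some 4)

-- ===== PORT B =====
def altIsVowel (c : Char) : Bool :=
  c = 'A' || c = 'E' || c = 'I' || c = 'O' || c = 'U'

-- the while loop of Source B: `first` = `not out` (nothing emitted yet);
-- the [c] arm is the loop's last iteration, where `i + 1 < n` fails
def altGo (first : Bool) : List Char → List Char
  | [] => []
  | [c] =>
      if c = 'C' then ['K']
      else if c = 'Q' then ['K']
      else if c = 'Z' then ['S']
      else if c = 'X' then ['K', 'S']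
      else if first || !altIsVowel c then [c] else []
  | c :: d :: r =>
      if c = 'P' ∧ d = 'H' then 'F' :: altGo false r
      else if c = 'C' ∧ d = 'K' then 'K' :: altGo false r
      else if c = 'C' then 'K' :: altGo false (d :: r)
      else if c = 'Q' then 'K' :: altGo false (d :: r)
      else if c = 'Z' then 'S' :: altGo false (d :: r)
      else if c = 'X' then 'K' :: 'S' :: altGo false (d :: r)
      else if first || !altIsVowel c then c :: altGo false (d :: r)
      else altGo false (d :: r)

def metaphone_alt (word : String) : String :=
  String.ofList ((altGo true (PySem.Chars.upper word.toList)).take 4)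

-- ===== PRECONDITION & SPEC =====
def Spec_metaphone (word : String) (out : String) : Prop := out = metaphone_alt word
instance (word : String) (out : String) : Decidable (Spec_metaphone word out) := by unfold Spec_metaphone; infer_instance

-- ===== CLAIM (what is proved, stated in full; the proofs are below) =====
def Claim_equal_metaphone : Prop := ∀ (word : String), Dom_metaphone word → Spec_metaphone word (metaphone word)

-- ===== LEMMAS AND PROOFS =====

-- Python str.replace with a one-char pattern, as a structural recursion
def repl1 (o : Char) (new : List Char) : List Char → List Char
  | [] => []
  | c :: t => if c = o then new ++ repl1 o new t else c :: repl1 o new t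

-- Python str.replace with a two-char pattern, as a structural recursion
def repl2 (o₁ o₂ : Char) (new : List Char) : List Char → List Char
  | [] => []
  | [c] => [c]
  | c :: d :: t =>
      if c = o₁ ∧ d = o₂ then new ++ repl2 o₁ o₂ new t
      else c :: repl2 o₁ o₂ new (d :: t)

-- the four single-char replaces C→K, Q→K, Z→S, X→KS composed
def gmap (c : Char) : List Char :=
  if c = 'X' then ['K', 'S']
  else if c = 'Z' then ['S']
  else if c = 'Q' then ['K']
  else if c = 'C' then ['K']
  else [c]

-- A's six replaces, on the char list
def core (l : List Char) : List Char :=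
  (repl2 'C' 'K' ['K'] (repl2 'P' 'H' ['F'] l)).flatMap gmap

-- keep the head, drop vowels in the tail
def prune : List Char → List Char
  | [] => []
  | c :: r => c :: r.filter (fun ch => !altIsVowel ch)

lemma go_repl1 (o : Char) (new : List Char) :
    ∀ (fuel : Nat) (l acc : List Char), l.length ≤ fuel →
      PySem.Chars.replace.go [o] new fuel l acc = acc.reverse ++ repl1 o new l := by
  intro fuel
  induction fuel with
  | zero =>
      intro l acc h
      have hl : l = [] := List.eq_nil_of_length_eq_zero (Nat.le_zero.mp h)
      subst hl
      rw [PySem.Chars.replace.go]; simp [repl1]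
  | succ n ih =>
      intro l acc h
      cases l with
      | nil =>
          rw [PySem.Chars.replace.go]
          · simp [repl1]
          · omega
      | cons c t =>
          rw [PySem.Chars.replace.go]; try omega
          simp only [List.length_cons] at h
          by_cases hc : c = o
          · have hp : ([o].isPrefixOf (c :: t)) = true := by simp [List.isPrefixOf, hc]
            rw [hp, if_pos rfl]
            have hd : List.drop [o].length (c :: t) = t := rfl
            rw [hd, ih _ _ (by omega)]
            simp [repl1, hc]
          · have hp : ([o].isPrefixOf (c :: t)) = false := by
              simp [List.isPrefixOf]; exact fun hh => hc hh.symm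
            rw [hp]
            simp only [Bool.false_eq_true, if_false]
            rw [ih _ _ (by omega)]
            simp [repl1, hc]

lemma go_repl2 (o₁ o₂ : Char) (new : List Char) :
    ∀ (fuel : Nat) (l acc : List Char), l.length ≤ fuel →
      PySem.Chars.replace.go [o₁, o₂] new fuel l acc = acc.reverse ++ repl2 o₁ o₂ new l := by
  intro fuel
  induction fuel with
  | zero =>
      intro l acc h
      have hl : l = [] := List.eq_nil_of_length_eq_zero (Nat.le_zero.mp h)
      subst hl
      rw [PySem.Chars.replace.go]; simp [repl2]
  | succ n ih =>
      intro l acc h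
      cases l with
      | nil =>
          rw [PySem.Chars.replace.go]
          · simp [repl2]
          · omega
      | cons c t =>
          rw [PySem.Chars.replace.go]; try omega
          simp only [List.length_cons] at h
          cases t with
          | nil =>
              have hp : ([o₁, o₂].isPrefixOf [c]) = false := by simp [List.isPrefixOf]
              rw [hp]
              simp only [Bool.false_eq_true, if_false]
              rw [ih _ _ (by omega)]
              simp [repl2]
          | cons d t' =>
              simp only [List.length_cons] at h
              by_cases hc : c = o₁ ∧ d = o₂
              · have hp : ([o₁, o₂].isPrefixOf (c :: d :: t')) = true := by
                  simp [List.isPrefixOf, hc.1, hc.2]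
                rw [hp, if_pos rfl]
                have hd : List.drop [o₁, o₂].length (c :: d :: t') = t' := rfl
                rw [hd, ih _ _ (by omega)]
                simp [repl2, hc]
              · have hp : ([o₁, o₂].isPrefixOf (c :: d :: t')) = false := by
                  simp [List.isPrefixOf]
                  intro h1 h2; exact absurd ⟨h1.symm, h2.symm⟩ hc
                rw [hp]
                simp only [Bool.false_eq_true, if_false]
                rw [ih _ _ (by simp; omega)]
                simp [repl2, hc]

lemma replace_repl1 (o : Char) (new l : List Char) :
    PySem.Chars.replace l [o] new = repl1 o new l := by
  simp [PySem.Chars.replace, go_repl1 o new l.length l [] le_rfl]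

lemma replace_repl2 (o₁ o₂ : Char) (new l : List Char) :
    PySem.Chars.replace l [o₁, o₂] new = repl2 o₁ o₂ new l := by
  simp [PySem.Chars.replace, go_repl2 o₁ o₂ new l.length l [] le_rfl]

-- the four single-char replaces collapse to one flatMap
lemma chain_gmap (l : List Char) :
    repl1 'X' ['K','S'] (repl1 'Z' ['S'] (repl1 'Q' ['K'] (repl1 'C' ['K'] l)))
      = l.flatMap gmap := by
  induction l with
  | nil => simp [repl1]
  | cons c t ih =>
      by_cases hX : c = 'X'
      · subst hX; simp [repl1, gmap, ih]
      · by_cases hZ : c = 'Z'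
        · subst hZ; simp [repl1, gmap, ih]
        · by_cases hQ : c = 'Q'
          · subst hQ; simp [repl1, gmap, ih]
          · by_cases hC : c = 'C'
            · subst hC; simp [repl1, gmap, ih]
            · simp [repl1, gmap, ih, hX, hZ, hQ, hC]

lemma repl2_cons_ne₁ {o₁ o₂ c : Char} {new : List Char} (hc : c ≠ o₁) (x : List Char) :
    repl2 o₁ o₂ new (c :: x) = c :: repl2 o₁ o₂ new x := by
  cases x <;> simp [repl2, hc]

lemma repl2_cons_ne₂ {o₁ o₂ c : Char} {new : List Char} {x : List Char}
    (hx : x.head? ≠ some o₂) :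
    repl2 o₁ o₂ new (c :: x) = c :: repl2 o₁ o₂ new x := by
  cases x with
  | nil => simp [repl2]
  | cons d r =>
      have hd : d ≠ o₂ := by simpa using hx
      simp only [repl2]
      rw [if_neg (fun h => hd h.2)]

lemma repl2_cons_match {o₁ o₂ : Char} {new : List Char} (r : List Char) :
    repl2 o₁ o₂ new (o₁ :: o₂ :: r) = new ++ repl2 o₁ o₂ new r := by
  simp [repl2]

lemma headPH {t : List Char} (h : t.head? ≠ some 'K') :
    (repl2 'P' 'H' ['F'] t).head? ≠ some 'K' := by
  cases t with
  | nil => simp [repl2]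
  | cons d r =>
      by_cases hd : d = 'P' ∧ r.head? = some 'H'
      · obtain ⟨hd1, hd2⟩ := hd
        subst hd1
        cases r with
        | nil => simp at hd2
        | cons e r' =>
            have he : e = 'H' := by simpa using hd2
            subst he
            rw [repl2_cons_match]
            simp
      · rcases Decidable.not_and_iff_not_or_not.mp hd with h1 | h2
        · rw [repl2_cons_ne₁ h1]; simpa using h
        · rw [repl2_cons_ne₂ h2]; simpa using h

lemma altGo_core : ∀ (n : Nat) (l : List Char), l.length ≤ n →
    altGo false l = (core l).filter (fun ch => !altIsVowel ch) ∧
    altGo true l = prune (core l) := by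
  intro n
  induction n with
  | zero =>
      intro l h
      have hl : l = [] := List.eq_nil_of_length_eq_zero (Nat.le_zero.mp h)
      subst hl
      simp [altGo, core, repl2, prune]
  | succ n ih =>
      intro l h
      cases l with
      | nil => simp [altGo, core, repl2, prune]
      | cons c t =>
          simp only [List.length_cons] at h
          cases t with
          | nil =>
              have hco : core [c] = gmap c := by
                unfold core; simp [repl2]
              by_cases hC : c = 'C'
              · subst hC; simp [altGo, hco, gmap, prune, altIsVowel]
              · by_cases hQ : c = 'Q'
                · subst hQ; simp [altGo, hco, gmap, prune, altIsVowel]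
                · by_cases hZ : c = 'Z'
                  · subst hZ; simp [altGo, hco, gmap, prune, altIsVowel]
                  · by_cases hX : c = 'X'
                    · subst hX; simp [altGo, hQ, hZ, hco, gmap, prune, altIsVowel]
                    · have hg : gmap c = [c] := by simp [gmap, hX, hZ, hQ, hC]
                      rw [hg] at hco
                      constructor
                      · simp only [altGo, hC, hQ, hZ, hX, if_false, Bool.false_or]
                        by_cases hv : altIsVowel c <;> simp [hv, hco]
                      · simp [altGo, hC, hQ, hZ, hX, hco, prune]
          | cons d r =>
              simp only [List.length_cons] at h
              have hihr := ih r (by omega)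
              have hihdr := ih (d :: r) (by simp; omega)
              by_cases hP : c = 'P' ∧ d = 'H'
              · obtain ⟨h1, h2⟩ := hP
                subst h1; subst h2
                have hco : core ('P' :: 'H' :: r) = 'F' :: core r := by
                  unfold core
                  rw [repl2_cons_match, List.singleton_append,
                      repl2_cons_ne₁ (show ('F' : Char) ≠ 'C' from by decide)]
                  simp [gmap]
                constructor <;> simp [altGo, hco, prune, hihr.1, altIsVowel]
              · by_cases hC : c = 'C' ∧ d = 'K'
                · obtain ⟨h1, h2⟩ := hC
                  subst h1; subst h2
                  have hco : core ('C' :: 'K' :: r) = 'K' :: core r := by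
                    unfold core
                    rw [repl2_cons_ne₁ (show ('C' : Char) ≠ 'P' from by decide),
                        repl2_cons_ne₁ (show ('K' : Char) ≠ 'P' from by decide),
                        repl2_cons_match]
                    simp [gmap]
                  constructor <;> simp [altGo, hco, prune, hihr.1, altIsVowel]
                · have hPH : repl2 'P' 'H' ['F'] (c :: d :: r)
                      = c :: repl2 'P' 'H' ['F'] (d :: r) := by
                    rcases Decidable.not_and_iff_not_or_not.mp hP with h1 | h2
                    · exact repl2_cons_ne₁ h1 _
                    · exact repl2_cons_ne₂ (by simpa using h2)
                  by_cases hC1 : c = 'C'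
                  · subst hC1
                    have hdk : d ≠ 'K' := fun hh => hC ⟨rfl, hh⟩
                    have hk : (d :: r).head? ≠ some 'K' := by simpa using hdk
                    have hco : core ('C' :: d :: r) = 'K' :: core (d :: r) := by
                      unfold core
                      rw [hPH, repl2_cons_ne₂ (headPH hk)]
                      simp [gmap]
                    constructor <;>
                      simp [altGo, hdk, hco, prune, hihdr.1, altIsVowel]
                  · have hCK : repl2 'C' 'K' ['K'] (c :: repl2 'P' 'H' ['F'] (d :: r))
                        = c :: repl2 'C' 'K' ['K'] (repl2 'P' 'H' ['F'] (d :: r)) :=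
                      repl2_cons_ne₁ hC1 _
                    have hco : core (c :: d :: r) = gmap c ++ core (d :: r) := by
                      unfold core
                      rw [hPH, hCK]
                      simp
                    by_cases hQ : c = 'Q'
                    · subst hQ
                      constructor <;> simp [altGo, hco, gmap, prune, hihdr.1, altIsVowel]
                    · by_cases hZ : c = 'Z'
                      · subst hZ
                        constructor <;> simp [altGo, hco, gmap, prune, hihdr.1, altIsVowel]
                      · by_cases hX : c = 'X'
                        · subst hX
                          constructor <;>
                            simp [altGo, hQ, hZ, hco, gmap, prune, hihdr.1, altIsVowel]
                        · have hg : gmap c = [c] := by simp [gmap, hX, hZ, hQ, hC1]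
                          rw [hg] at hco
                          constructor
                          · simp only [altGo, hP, hC1, hQ, hZ, hX, if_false, Bool.false_or]
                            by_cases hv : altIsVowel c <;>
                              simp [hv, hco, hihdr.1]
                          · simp [altGo, hP, hC1, hQ, hZ, hX, hco, prune, hihdr.1]

lemma repl2_ne_nil {o₁ o₂ : Char} {new : List Char} {l : List Char}
    (hnew : new ≠ []) (hl : l ≠ []) : repl2 o₁ o₂ new l ≠ [] := by
  cases l with
  | nil => exact absurd rfl hl
  | cons c t =>
      cases t with
      | nil => simp [repl2]
      | cons d r =>
          simp only [repl2]
          split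
          · simp [hnew]
          · simp

lemma gmap_ne_nil (c : Char) : gmap c ≠ [] := by
  simp only [gmap]; split_ifs <;> simp

lemma core_ne_nil {l : List Char} (h : l ≠ []) : core l ≠ [] := by
  unfold core
  have h1 : repl2 'P' 'H' ['F'] l ≠ [] := repl2_ne_nil (by simp) h
  have h2 : repl2 'C' 'K' ['K'] (repl2 'P' 'H' ['F'] l) ≠ [] := repl2_ne_nil (by simp) h1
  obtain ⟨c, t, hct⟩ := List.exists_cons_of_ne_nil h2
  rw [hct]
  simp [gmap_ne_nil c]

lemma isIn_vowels (ch : Char) :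
    PySem.Chars.isIn [ch] "AEIOU".toList = altIsVowel ch := by
  have hlist : "AEIOU".toList = ['A', 'E', 'I', 'O', 'U'] := by decide
  by_cases hv : altIsVowel ch = true
  · rw [hv]
    apply (PySem.Chars.isIn_iff_infix _ _).mpr
    apply (List.singleton_infix_iff _ _).mpr
    rw [hlist]
    simp only [altIsVowel, Bool.or_eq_true, decide_eq_true_eq] at hv
    rcases hv with (((h|h)|h)|h)|h <;> subst h <;> decide
  · rw [Bool.not_eq_true] at hv
    rw [hv]
    apply (PySem.Chars.isIn_eq_false_iff _ _).mpr
    intro hinf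
    rw [hlist] at hinf
    have hm := (List.singleton_infix_iff _ _).mp hinf
    simp only [altIsVowel, Bool.or_eq_false_iff, decide_eq_false_iff_not] at hv
    simp only [List.mem_cons, List.not_mem_nil, or_false] at hm
    rcases hm with h|h|h|h|h <;> simp_all

-- ===== VERDICT (by name: the statement is the Claim_ definition above) =====
theorem metaphone_spec : Claim_equal_metaphone := by
  intro word _
  unfold Spec_metaphone metaphone_alt
  by_cases hw : word = ""
  · subst hw
    decide
  · have hl : word.toList ≠ [] := by
      intro h
      exact hw (String.toList_inj.mp h)
    have hune : PySem.Chars.upper word.toList ≠ [] := by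
      simp only [PySem.Chars.upper, ne_eq, List.map_eq_nil_iff]
      exact hl
    set u := PySem.Chars.upper word.toList with hu
    obtain ⟨c, r, hcr⟩ := List.exists_cons_of_ne_nil (core_ne_nil hune)
    have hB : altGo true u = c :: r.filter (fun ch => !altIsVowel ch) := by
      rw [(altGo_core u.length u le_rfl).2, hcr, prune]
    have e1 : (PySem.Str.upper word).toList = u := by
      rw [PySem.Str.toList_upper]
    have e2 : (PySem.Str.replace (PySem.Str.upper word) "PH" "F").toList
        = repl2 'P' 'H' ['F'] u := by
      rw [PySem.Str.toList_replace, e1, show ("PH" : String).toList = ['P', 'H'] from rfl,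
          show ("F" : String).toList = ['F'] from rfl, replace_repl2]
    have e3 : (PySem.Str.replace (PySem.Str.replace (PySem.Str.upper word) "PH" "F")
          "CK" "K").toList = repl2 'C' 'K' ['K'] (repl2 'P' 'H' ['F'] u) := by
      rw [PySem.Str.toList_replace, e2, show ("CK" : String).toList = ['C', 'K'] from rfl,
          show ("K" : String).toList = ['K'] from rfl, replace_repl2]
    have e7 : (PySem.Str.replace (PySem.Str.replace (PySem.Str.replace (PySem.Str.replace
          (PySem.Str.replace (PySem.Str.replace (PySem.Str.upper word) "PH" "F") "CK" "K")
          "C" "K") "Q" "K") "Z" "S") "X" "KS").toList = c :: r := by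
      rw [PySem.Str.toList_replace, PySem.Str.toList_replace, PySem.Str.toList_replace,
          PySem.Str.toList_replace, e3,
          show ("C" : String).toList = ['C'] from rfl,
          show ("K" : String).toList = ['K'] from rfl,
          show ("Q" : String).toList = ['Q'] from rfl,
          show ("Z" : String).toList = ['Z'] from rfl,
          show ("S" : String).toList = ['S'] from rfl,
          show ("X" : String).toList = ['X'] from rfl,
          show ("KS" : String).toList = ['K', 'S'] from rfl,
          replace_repl1, replace_repl1, replace_repl1, replace_repl1, chain_gmap]
      rw [← core, hcr]
    simp only [metaphone, if_neg hw]
    rw [hB]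
    apply String.toList_inj.mp
    cases r with
    | nil =>
        rw [if_neg (by rw [PySem.Str.len_eq, e7]; simp)]
        simp [pysem, e7]
    | cons d r' =>
        rw [if_pos (by rw [PySem.Str.len_eq, e7]; simp)]
        have hget : PySem.Str.pyGet? (PySem.Str.replace (PySem.Str.replace (PySem.Str.replace
            (PySem.Str.replace (PySem.Str.replace (PySem.Str.replace (PySem.Str.upper word)
            "PH" "F") "CK" "K") "C" "K") "Q" "K") "Z" "S") "X" "KS") 0 = some c := by
          simp [pysem, e7]
        rw [hget]
        have hslice : (PySem.Str.slice (PySem.Str.replace (PySem.Str.replace (PySem.Str.replace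
            (PySem.Str.replace (PySem.Str.replace (PySem.Str.replace (PySem.Str.upper word)
            "PH" "F") "CK" "K") "C" "K") "Q" "K") "Z" "S") "X" "KS") (some 1) none).toList
            = d :: r' := by
          simp [pysem, e7]
        rw [hslice]
        simp only [isIn_vowels]
        simp [pysem]
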